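-- pv_equiv track=rewrite | github.com/Evandle/Where-All-Miracles-Began | Where it all started/OldKnowledgeBackup.py | owotranslate
-- ===== SOURCE A (Python) =====
-- def owotranslate(phrase):
--     owotranslate = ""
--     for letter in phrase:
--         if letter.lower() in "lr":
--             owotranslate = f"{owotranslate}W" if letter.isupper() else f"{owotranslate}w"
--         else:
--             owotranslate = owotranslate + letter
--     return owotranslate
-- ===== SOURCE B (Python) =====
-- _OWO = str.maketrans({'l': 'w', 'L': 'W', 'r': 'w', 'R': 'W'})
--
-- def owotranslate(phrase):
--     return phrase.translate(_OWO)
-- ===== Notes on version B (the rewrite author's own statement) =====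
-- stated objective: faster
-- what changed: Replaces the explicit per-character loop (membership test, isupper branch, rebuilding the string by concatenation each step) by a translation table built once with str.maketrans and a single phrase.translate call.
import Mathlib
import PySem

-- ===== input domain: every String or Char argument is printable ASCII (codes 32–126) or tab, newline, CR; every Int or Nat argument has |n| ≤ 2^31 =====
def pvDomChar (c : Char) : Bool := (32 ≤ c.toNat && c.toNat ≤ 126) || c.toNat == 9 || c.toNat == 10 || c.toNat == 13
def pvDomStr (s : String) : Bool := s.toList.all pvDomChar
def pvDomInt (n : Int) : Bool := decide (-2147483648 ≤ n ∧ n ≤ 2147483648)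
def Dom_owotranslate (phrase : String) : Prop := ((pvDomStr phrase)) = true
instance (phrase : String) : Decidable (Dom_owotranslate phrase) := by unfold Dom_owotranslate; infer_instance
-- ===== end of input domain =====

-- B replaces A's per-character loop (which rebuilds the accumulator string each step)
-- by a translation table built once and a single translate pass; objective: faster.

-- ===== PORT A =====
def owotranslate (phrase : String) : String :=
  phrase.toList.foldl (fun acc letter =>
    if "lr".toList.contains (PySem.Chars.lowerChar letter) then
      if PySem.Chars.isupper letter then acc ++ "W" else acc ++ "w"
    else acc ++ String.singleton letter) ""

-- ===== PORT B =====
-- the str.maketrans table of Source B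
def owoTable : PySem.Dict Char Char :=
  PySem.Dict.ofList [('l', 'w'), ('L', 'W'), ('r', 'w'), ('R', 'W')]

-- phrase.translate(table): each character replaced by its table image, unmapped chars unchanged
def owotranslate_alt (phrase : String) : String :=
  String.ofList (phrase.toList.map (fun c => (owoTable.get? c).getD c))

-- ===== PRECONDITION & SPEC =====
def Spec_owotranslate (phrase : String) (out : String) : Prop := out = owotranslate_alt phrase
instance (phrase : String) (out : String) : Decidable (Spec_owotranslate phrase out) := by unfold Spec_owotranslate; infer_instance

-- ===== CLAIM (what is proved, stated in full; the proofs are below) =====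
def Claim_equal_owotranslate : Prop := ∀ (phrase : String), Dom_owotranslate phrase → Spec_owotranslate phrase (owotranslate phrase)

-- ===== LEMMAS AND PROOFS =====
-- the per-character result of A's loop body
def owoStep (c : Char) : Char :=
  if "lr".toList.contains (PySem.Chars.lowerChar c) then
    if PySem.Chars.isupper c then 'W' else 'w'
  else c

theorem char_toNat_inj {a b : Char} (h : a.toNat = b.toNat) : a = b := by
  have := Char.ofNat_toNat a
  rw [h, Char.ofNat_toNat] at this
  exact this.symm

theorem upper_toNat_bounds {c : Char} (hu : PySem.Chars.isupper c = true) :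
    65 ≤ c.toNat ∧ c.toNat ≤ 90 := by
  have hA : 'A' ≤ c ∧ c ≤ 'Z' := by simpa [PySem.Chars.isupper] using hu
  have h1 := UInt32.le_iff_toNat_le.mp (Char.le_def.mp hA.1)
  have h2 := UInt32.le_iff_toNat_le.mp (Char.le_def.mp hA.2)
  have e1 : ('A').val.toNat = 65 := by decide
  have e2 : ('Z').val.toNat = 90 := by decide
  exact ⟨by rw [e1] at h1; exact h1, by rw [e2] at h2; exact h2⟩

theorem lower_eq_of_upper {c : Char} (hu : PySem.Chars.isupper c = true) (t : Char)
    (he : PySem.Chars.lowerChar c = t) : c.toNat + 32 = t.toNat := by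
  have hb := upper_toNat_bounds hu
  unfold PySem.Chars.lowerChar at he
  rw [if_pos hu] at he
  have h := congrArg Char.toNat he
  rw [Char.toNat_ofNat, if_pos] at h
  · exact h
  · unfold Nat.isValidChar; left; omega

-- A's loop body agrees character-by-character with B's table lookup
theorem step_eq (c : Char) : owoStep c = (owoTable.get? c).getD c := by
  by_cases h1 : c = 'l'; · subst h1; decide
  by_cases h2 : c = 'L'; · subst h2; decide
  by_cases h3 : c = 'r'; · subst h3; decide
  by_cases h4 : c = 'R'; · subst h4; decide
  have hlow : PySem.Chars.lowerChar c ≠ 'l' ∧ PySem.Chars.lowerChar c ≠ 'r' := by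
    by_cases hu : PySem.Chars.isupper c = true
    · constructor <;> intro he
      · refine h2 (char_toNat_inj (show c.toNat = Char.toNat 'L' from ?_))
        have h := lower_eq_of_upper hu 'l' he
        have e1 : Char.toNat 'l' = 108 := by decide
        have e2 : Char.toNat 'L' = 76 := by decide
        omega
      · refine h4 (char_toNat_inj (show c.toNat = Char.toNat 'R' from ?_))
        have h := lower_eq_of_upper hu 'r' he
        have e1 : Char.toNat 'r' = 114 := by decide
        have e2 : Char.toNat 'R' = 82 := by decide
        omega
    · unfold PySem.Chars.lowerChar
      rw [if_neg hu]
      exact ⟨h1, h3⟩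
  have htab : owoTable.get? c = none := by
    have hm : owoTable = PySem.Dict.mk [('l', 'w'), ('L', 'W'), ('r', 'w'), ('R', 'W')] := by rfl
    rw [hm]
    simp [Ne.symm h1, Ne.symm h2, Ne.symm h3, Ne.symm h4, PySem.Dict.get?]
  simp [owoStep, htab, hlow.1, hlow.2]

-- A's foldl appends owoStep of each character to the accumulator
theorem fold_eq (l : List Char) (s : String) :
    l.foldl (fun acc letter =>
      if "lr".toList.contains (PySem.Chars.lowerChar letter) then
        if PySem.Chars.isupper letter then acc ++ "W" else acc ++ "w"
      else acc ++ String.singleton letter) s = s ++ String.ofList (l.map owoStep) := by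
  induction l generalizing s with
  | nil => simp
  | cons c l ih =>
    have hstep : ∀ t : String,
        (if "lr".toList.contains (PySem.Chars.lowerChar c) then
          if PySem.Chars.isupper c then t ++ "W" else t ++ "w"
        else t ++ String.singleton c) = t ++ String.singleton (owoStep c) := by
      intro t; unfold owoStep; split <;> [split <;> rfl; rfl]
    simp only [List.foldl_cons, hstep, ih, List.map_cons]
    rw [String.append_assoc]
    congr 1
    apply String.toList_inj.mp
    simp [String.singleton]

-- ===== VERDICT (by name: the statement is the Claim_ definition above) =====
theorem owotranslate_spec : Claim_equal_owotranslate := by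
  intro phrase _
  show owotranslate phrase = owotranslate_alt phrase
  unfold owotranslate owotranslate_alt
  rw [fold_eq]
  have hf : owoStep = fun c => (owoTable.get? c).getD c := funext step_eq
  rw [hf]
  apply String.toList_inj.mp
  simp
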